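-- pv_equiv track=rewrite | github.com/NCAR/wrfcloud | python/src/wrfcloud/config/config.py | _get_min_max_grids
-- ===== SOURCE A (Python) =====
-- def _get_min_max_grids(xy_pair_list: list):
--     """
--     Get indices of smallest and largest grids.
--     :param xy_pair_list: List of tuples with nx/ny pairs (integers)
--     :return: Number of cores
--     """
--     min_grid = max_grid = None
--     min_idx = max_idx = 0
--     for idx, (nx, ny) in enumerate(xy_pair_list):
--         grid_size = nx * ny
--         if min_grid is None or grid_size < min_grid:
--             min_grid = grid_size
--             min_idx = idx
--         if max_grid is None or grid_size > max_grid: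
--             max_grid = grid_size
--             max_idx = idx
--
--     return min_idx, max_idx
-- ===== SOURCE B (Python) =====
-- def _get_min_max_grids(xy_pair_list: list):
--     """
--     Get indices of smallest and largest grids.
--     :param xy_pair_list: List of tuples with nx/ny pairs (integers)
--     :return: Number of cores
--     """
--     if not xy_pair_list:
--         return 0, 0
--     min_i, _, max_i, _ = _extrema(xy_pair_list, 0, len(xy_pair_list))
--     return min_i, max_i
--
--
-- def _extrema(pairs, lo, hi):
--     """Tournament (divide-and-conquer) extrema of products on pairs[lo:hi]
--     (non-empty); returns (min_idx, min_val, max_idx, max_val), ties won by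
--     the left half, so the first occurrence wins as in a left-to-right scan."""
--     if hi - lo == 1:
--         nx, ny = pairs[lo]
--         p = nx * ny
--         return lo, p, lo, p
--     mid = (lo + hi) // 2
--     lmin_i, lmin_v, lmax_i, lmax_v = _extrema(pairs, lo, mid)
--     rmin_i, rmin_v, rmax_i, rmax_v = _extrema(pairs, mid, hi)
--     min_i, min_v = (rmin_i, rmin_v) if rmin_v < lmin_v else (lmin_i, lmin_v)
--     max_i, max_v = (rmax_i, rmax_v) if rmax_v > lmax_v else (lmax_i, lmax_v)
--     return min_i, min_v, max_i, max_v
-- ===== Notes on version B (the rewrite author's own statement) =====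
-- stated objective: alternative
-- what changed: Replaces A's single left-to-right incremental extremum scan by a tournament-style divide-and-conquer: the index range is split in half recursively and the two halves' (min,max) candidates are merged, ties won by the left half so first occurrence is preserved.
import Mathlib
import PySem

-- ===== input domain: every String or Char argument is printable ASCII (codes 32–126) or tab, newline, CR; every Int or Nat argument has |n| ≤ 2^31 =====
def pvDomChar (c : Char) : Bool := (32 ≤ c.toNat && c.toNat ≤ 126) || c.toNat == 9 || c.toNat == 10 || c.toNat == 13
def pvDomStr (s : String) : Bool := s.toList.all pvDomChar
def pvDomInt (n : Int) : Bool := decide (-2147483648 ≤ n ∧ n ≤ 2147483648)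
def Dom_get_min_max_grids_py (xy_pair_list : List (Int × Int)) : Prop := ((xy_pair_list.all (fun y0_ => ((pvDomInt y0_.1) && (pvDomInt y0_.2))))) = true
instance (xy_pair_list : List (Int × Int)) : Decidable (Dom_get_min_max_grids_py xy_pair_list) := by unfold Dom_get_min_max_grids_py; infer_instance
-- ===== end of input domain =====

-- B replaces A's single incremental extremum scan by a tournament-style
-- divide-and-conquer over index ranges (alternative algorithm; same O(n) cost).


-- ===== PORT A =====
-- loop state: (min_grid, max_grid, min_idx, max_idx)
def getMinMaxStepA (st : Option Int × Option Int × Int × Int) (p : Int × Int × Int) :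
    Option Int × Option Int × Int × Int :=
  let grid := p.2.1 * p.2.2
  let (mg, mi) :=
    match st.1 with
    | none => (some grid, p.1)
    | some m => if grid < m then (some grid, p.1) else (some m, st.2.2.1)
  let (Mg, Mi) :=
    match st.2.1 with
    | none => (some grid, p.1)
    | some m => if grid > m then (some grid, p.1) else (some m, st.2.2.2)
  (mg, Mg, mi, Mi)

def get_min_max_grids_py (xy_pair_list : List (Int × Int)) : Int × Int :=
  let s := (PySem.List.enumerate xy_pair_list 0).foldl getMinMaxStepA (none, none, 0, 0)
  (s.2.2.1, s.2.2.2)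

-- ===== PORT B =====
-- _extrema(pairs, lo, hi): tournament extrema of products on pairs[lo:hi],
-- only ever called with lo < hi (so pairs[lo] is in range and getD is exact);
-- returns (min_idx, min_val, max_idx, max_val), ties won by the left half.
-- Python's base test 'hi - lo == 1' is written 'hi ≤ lo + 1' only to make the
-- recursion total on the never-reached empty range; on lo < hi they coincide.
def extremaB (pairs : List (Int × Int)) (lo hi : Nat) : Int × Int × Int × Int :=
  if hi ≤ lo + 1 then
    let p := (pairs.getD lo (0, 0)).1 * (pairs.getD lo (0, 0)).2
    ((lo : Int), p, (lo : Int), p)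
  else
    let mid := (lo + hi) / 2
    let L := extremaB pairs lo mid
    let R := extremaB pairs mid hi
    let mn := if R.2.1 < L.2.1 then (R.1, R.2.1) else (L.1, L.2.1)
    let mx := if R.2.2.2 > L.2.2.2 then (R.2.2.1, R.2.2.2) else (L.2.2.1, L.2.2.2)
    (mn.1, mn.2, mx.1, mx.2)
termination_by hi - lo
decreasing_by all_goals omega

def get_min_max_grids_py_alt (xy_pair_list : List (Int × Int)) : Int × Int :=
  if xy_pair_list.isEmpty then (0, 0)
  else
    let r := extremaB xy_pair_list 0 xy_pair_list.length
    (r.1, r.2.2.1)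

-- ===== PRECONDITION & SPEC =====
def Spec_get_min_max_grids_py (xy_pair_list : List (Int × Int)) (out : Int × Int) : Prop := out = get_min_max_grids_py_alt xy_pair_list
instance (xy_pair_list : List (Int × Int)) (out : Int × Int) : Decidable (Spec_get_min_max_grids_py xy_pair_list out) := by unfold Spec_get_min_max_grids_py; infer_instance

-- ===== CLAIM (what is proved, stated in full; the proofs are below) =====
def Claim_equal_get_min_max_grids_py : Prop := ∀ (xy_pair_list : List (Int × Int)), Dom_get_min_max_grids_py xy_pair_list → Spec_get_min_max_grids_py xy_pair_list (get_min_max_grids_py xy_pair_list)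

-- ===== LEMMAS AND PROOFS =====

-- first-occurrence argmin / argmax accumulators (reference form of A's loop)
def minStep (acc : Option (Int × Int)) (x : Int × Int) : Option (Int × Int) :=
  match acc with
  | none => some x
  | some m => if x.2 < m.2 then some x else some m

def maxStep (acc : Option (Int × Int)) (x : Int × Int) : Option (Int × Int) :=
  match acc with
  | none => some x
  | some m => if x.2 > m.2 then some x else some m

def repSt (m M : Option (Int × Int)) (dmin dmax : Int) : Option Int × Option Int × Int × Int :=
  (m.map Prod.snd, M.map Prod.snd, m.elim dmin Prod.fst, M.elim dmax Prod.fst)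

lemma loop_inv (l : List (Int × Int)) :
    ∀ (i : Int) (m M : Option (Int × Int)) (dmin dmax : Int),
    (PySem.List.enumerate l i).foldl getMinMaxStepA (repSt m M dmin dmax) =
      repSt ((PySem.List.enumerate l i).foldl (fun a p => minStep a (p.1, p.2.1 * p.2.2)) m)
            ((PySem.List.enumerate l i).foldl (fun a p => maxStep a (p.1, p.2.1 * p.2.2)) M)
            dmin dmax := by
  induction l with
  | nil => intro i m M dmin dmax; simp [PySem.List.enumerate_nil]
  | cons x t ih =>
    intro i m M dmin dmax
    rw [PySem.List.enumerate_cons]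
    simp only [List.foldl_cons]
    have hstep : getMinMaxStepA (repSt m M dmin dmax) (i, x) =
        repSt (minStep m (i, x.1 * x.2)) (maxStep M (i, x.1 * x.2)) dmin dmax := by
      cases m <;> cases M <;>
        simp [getMinMaxStepA, repSt, minStep, maxStep] <;> split_ifs <;> and_intros <;> rfl
    rw [hstep, ih]

-- the (index, product) pairs for indices [lo, hi)
def seg (pairs : List (Int × Int)) (lo hi : Nat) : List (Int × Int) :=
  (List.range' lo (hi - lo)).map
    (fun (i : Nat) => ((i : Int), (pairs.getD i (0, 0)).1 * (pairs.getD i (0, 0)).2))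

lemma minStep_merge (b : List (Int × Int)) : ∀ m : Int × Int,
    b.foldl minStep (some m) =
      (match b.foldl minStep none with
       | none => some m
       | some r => if r.2 < m.2 then some r else some m) := by
  induction b with
  | nil => intro m; rfl
  | cons x t ih =>
    intro m
    simp only [List.foldl_cons, minStep]
    rw [ih x]
    split_ifs with h1
    · rw [ih x]
      cases t.foldl minStep none with
      | none => simp [h1]
      | some r => simp only; split_ifs <;> simp_all <;> omega
    · rw [ih m]
      cases t.foldl minStep none with
      | none => simp [h1]
      | some r => simp only; split_ifs <;> simp_all <;> omega

lemma maxStep_merge (b : List (Int × Int)) : ∀ m : Int × Int,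
    b.foldl maxStep (some m) =
      (match b.foldl maxStep none with
       | none => some m
       | some r => if r.2 > m.2 then some r else some m) := by
  induction b with
  | nil => intro m; rfl
  | cons x t ih =>
    intro m
    simp only [List.foldl_cons, maxStep]
    rw [ih x]
    split_ifs with h1
    · rw [ih x]
      cases t.foldl maxStep none with
      | none => simp [h1]
      | some r => simp only; split_ifs <;> simp_all <;> omega
    · rw [ih m]
      cases t.foldl maxStep none with
      | none => simp [h1]
      | some r => simp only; split_ifs <;> simp_all <;> omega

lemma seg_append (pairs : List (Int × Int)) (lo mid hi : Nat)
    (h1 : lo ≤ mid) (h2 : mid ≤ hi) :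
    seg pairs lo hi = seg pairs lo mid ++ seg pairs mid hi := by
  unfold seg
  rw [← List.map_append]
  congr 1
  have h := List.range'_append (s := lo) (m := mid - lo) (n := hi - mid) (step := 1)
  rw [show lo + 1 * (mid - lo) = mid from by omega,
      show (mid - lo) + (hi - mid) = hi - lo from by omega] at h
  rw [← h]

lemma extrema_spec (pairs : List (Int × Int)) : ∀ (lo hi : Nat), lo < hi →
    (seg pairs lo hi).foldl minStep none =
      some ((extremaB pairs lo hi).1, (extremaB pairs lo hi).2.1) ∧
    (seg pairs lo hi).foldl maxStep none =
      some ((extremaB pairs lo hi).2.2.1, (extremaB pairs lo hi).2.2.2) := by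
  intro lo hi
  induction lo, hi using extremaB.induct pairs with
  | case1 lo hi hle =>
    intro h
    have : hi = lo + 1 := by omega
    subst this
    simp [extremaB, seg, minStep, maxStep]
  | case2 lo hi hle mid ihL ihR =>
    intro _
    obtain ⟨iL1, iL2⟩ := ihL (by omega)
    obtain ⟨iR1, iR2⟩ := ihR (by omega)
    rw [seg_append pairs lo mid hi (by omega) (by omega)]
    rw [extremaB]
    simp only [if_neg hle]
    rw [show ((lo + hi) / 2 : Nat) = mid from rfl]
    constructor
    · rw [List.foldl_append, iL1, minStep_merge, iR1]
      split_ifs <;> simp_all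
    · rw [List.foldl_append, iL2, maxStep_merge, iR2]
      split_ifs <;> simp_all

lemma seg_eq_enumerate (l : List (Int × Int)) :
    seg l 0 l.length = (PySem.List.enumerate l 0).map (fun q => (q.1, q.2.1 * q.2.2)) := by
  apply List.ext_getElem
  · simp [seg, PySem.List.length_enumerate]
  · intro k h1 h2
    have hk : k < l.length := by simpa [seg] using h1
    simp only [seg, Nat.sub_zero, List.getElem_map, List.getElem_range',
      PySem.List.getElem_enumerate]
    simp [List.getD_eq_getElem?_getD, List.getElem?_eq_getElem hk]

-- ===== VERDICT (by name: the statement is the Claim_ definition above) =====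
theorem get_min_max_grids_py_spec : Claim_equal_get_min_max_grids_py := by
  intro l _
  unfold Spec_get_min_max_grids_py get_min_max_grids_py get_min_max_grids_py_alt
  have h := loop_inv l 0 none none 0 0
  simp only [repSt, Option.map_none, Option.elim_none] at h
  cases hl : l with
  | nil => simp [PySem.List.enumerate_nil]
  | cons x t =>
    rw [← hl]
    have hne : l.isEmpty = false := by simp [hl]
    simp only [hne, Bool.false_eq_true, if_false, h]
    have hlen : 0 < l.length := by simp [hl]
    obtain ⟨h1, h2⟩ := extrema_spec l 0 l.length hlen
    rw [seg_eq_enumerate, List.foldl_map] at h1 h2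
    simp only [h1, h2]
    rfl
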